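-- pv_equiv track=rewrite | github.com/bmk15897/Practice | TCkingdoms.py | fnumber
-- ===== SOURCE A (Python) =====
-- def fnumber(input1,input2):
--     cities=input2
--     k=input1
--     n=len(cities)
--     if sum(cities) <= k:
--         return -1
--     else:
--         f = [[] for x in range(n)]
--         maxEle = [0 for y in range(n)]
--         for i in range(n):
--             j = n - cities[i]
--             while (j >= 0):
--                 f[i].append(sum(cities[j:j + cities[i]]))
--                 j -= 1
--             maxEle[i] = max(f[i])
--         minEle = min([x for x in maxEle if x > k])
--         return (maxEle.index(minEle) + 1)
-- ===== SOURCE B (Python) =====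
-- def fnumber(input1, input2):
--     cities = input2
--     k = input1
--     n = len(cities)
--     if sum(cities) <= k:
--         return -1
--     prefix = [0]
--     for c in cities:
--         prefix.append(prefix[-1] + c)
--     def wsum(a, b):
--         # exact sum(cities[a:b]) in O(1) via prefix sums (Python slice index rules)
--         if a < 0:
--             a += n
--         if b < 0:
--             b += n
--         a = min(max(a, 0), n)
--         b = min(max(b, 0), n)
--         return prefix[b] - prefix[a] if b > a else 0
--     best = {}  # the best window sum depends only on the window length c: compute it once per length
--     maxEle = []
--     for c in cities:
--         if c not in best:
--             best[c] = max(wsum(j, j + c) for j in range(n - c + 1))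
--         maxEle.append(best[c])
--     minEle = min(x for x in maxEle if x > k)
--     return maxEle.index(minEle) + 1
-- ===== Notes on version B (the rewrite author's own statement) =====
-- stated objective: faster
-- what changed: Replaces A's per-window sum(cities[j:j+c]) (recomputed by an O(n) slice-sum inside a descending while loop, plus a list-of-lists f) with a prefix-sum array giving each window sum in O(1), scanning windows forward in a comprehension.
import Mathlib
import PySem

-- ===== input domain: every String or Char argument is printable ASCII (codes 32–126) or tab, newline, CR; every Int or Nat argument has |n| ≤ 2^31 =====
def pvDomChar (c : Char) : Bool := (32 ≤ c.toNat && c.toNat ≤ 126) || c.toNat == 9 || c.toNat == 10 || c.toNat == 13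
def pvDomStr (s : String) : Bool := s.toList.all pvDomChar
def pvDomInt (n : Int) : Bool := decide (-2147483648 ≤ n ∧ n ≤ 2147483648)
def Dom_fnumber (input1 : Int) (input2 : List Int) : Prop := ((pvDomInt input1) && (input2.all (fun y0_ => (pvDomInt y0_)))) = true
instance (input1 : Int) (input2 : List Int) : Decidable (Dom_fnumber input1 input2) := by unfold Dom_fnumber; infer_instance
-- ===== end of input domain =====

-- B replaces A's O(n) slice-sum per window (recomputed inside a descending while loop over a
-- list-of-lists) by a prefix-sum array giving each window sum in O(1).

-- ===== PORT A =====
-- the inner 'while (j >= 0): f[i].append(sum(cities[j:j+c])); j -= 1' loop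
def pvWhileA (cities : List Int) (c : Int) (j : Int) : List Int :=
  if h : 0 ≤ j then
    (PySem.List.slice cities (some j) (some (j + c))).sum :: pvWhileA cities c (j - 1)
  else []
termination_by (j + 1).toNat
decreasing_by omega

def fnumber (input1 : Int) (input2 : List Int) : Int :=
  let cities := input2
  let k := input1
  let n := cities.length
  if cities.sum ≤ k then -1
  else
    -- for i in range(n): f[i] = the while-loop's list; maxEle[i] = max(f[i])  (max([]) raises: outside Pre_)
    let maxEle : List Int := (PySem.List.pyRange 0 (n : Int) 1).map (fun i =>
      (PySem.List.max? (pvWhileA cities (PySem.List.pyGetD cities i 0)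
        ((n : Int) - PySem.List.pyGetD cities i 0)) (fun x => x)).getD 0)
    -- min([x for x in maxEle if x > k])  (min([]) raises: outside Pre_)
    let minEle := (PySem.List.min? (maxEle.filter (fun x => decide (k < x))) (fun x => x)).getD 0
    ((PySem.List.index? maxEle minEle).getD 0 : Int) + 1

-- ===== PORT B =====
-- prefix = [0]; for c in cities: prefix.append(prefix[-1] + c)
def pvPrefix (cities : List Int) : List Int :=
  cities.foldl (fun p c => p ++ [PySem.List.pyGetD p (-1) 0 + c]) [0]

-- wsum(a, b): sum(cities[a:b]) via prefix differences, with Python's slice index rules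
def pvWsum (P : List Int) (n : Int) (a b : Int) : Int :=
  let a1 := if a < 0 then a + n else a
  let b1 := if b < 0 then b + n else b
  let a2 := min (max a1 0) n
  let b2 := min (max b1 0) n
  if b2 > a2 then PySem.List.pyGetD P b2 0 - PySem.List.pyGetD P a2 0 else 0

-- the 'for c in cities: if c not in best: best[c] = max(wsum(j, j+c) for j in range(n-c+1));
-- maxEle.append(best[c])' loop (the best window sum depends only on the length c, memoised once per length)
def pvLoopB (P : List Int) (n : Int) (cs : List Int) (best : PySem.Dict Int Int)
    (maxEle : List Int) : List Int :=
  match cs with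
  | [] => maxEle
  | c :: rest =>
    let best := if best.contains c then best
      else best.insert c ((PySem.List.max? ((PySem.List.pyRange 0 (n - c + 1) 1).map
        (fun j => pvWsum P n j (j + c))) (fun x => x)).getD 0)
    pvLoopB P n rest best (maxEle ++ [best.getD c 0])

def fnumber_alt (input1 : Int) (input2 : List Int) : Int :=
  let cities := input2
  let k := input1
  let n := cities.length
  if cities.sum ≤ k then -1
  else
    let P := pvPrefix cities
    let maxEle : List Int := pvLoopB P (n : Int) cities PySem.Dict.empty []
    let minEle := (PySem.List.min? (maxEle.filter (fun x => decide (k < x))) (fun x => x)).getD 0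
    ((PySem.List.index? maxEle minEle).getD 0 : Int) + 1

-- ===== PRECONDITION & SPEC =====
-- Pre_ is exactly where Python A returns normally: A raises ValueError on max([]) when
-- sum(cities) > k and some cities[i] > n, and on min([]) when sum(cities) > k but no window sum
-- exceeds k (B raises ValueError at the same inputs).
def Pre_fnumber (input1 : Int) (input2 : List Int) : Prop :=
  input2.sum ≤ input1 ∨
  ((∀ c ∈ input2, c ≤ (input2.length : Int)) ∧
   ∃ c ∈ input2, ∃ j ∈ PySem.List.pyRange 0 ((input2.length : Int) - c + 1) 1,
     input1 < (PySem.List.slice input2 (some j) (some (j + c))).sum)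
instance (input1 : Int) (input2 : List Int) : Decidable (Pre_fnumber input1 input2) := by
  unfold Pre_fnumber; infer_instance

def pvWitness_fnumber : Int × List Int := (0, [1, 2])

def Spec_fnumber (input1 : Int) (input2 : List Int) (out : Int) : Prop := out = fnumber_alt input1 input2
instance (input1 : Int) (input2 : List Int) (out : Int) : Decidable (Spec_fnumber input1 input2 out) := by
  unfold Spec_fnumber; infer_instance

-- ===== CLAIM (what is proved, stated in full; the proofs are below) =====
def Claim_equal_fnumber : Prop := ∀ (input1 : Int) (input2 : List Int), Dom_fnumber input1 input2 → Pre_fnumber input1 input2 → Spec_fnumber input1 input2 (fnumber input1 input2)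

-- ===== LEMMAS AND PROOFS =====

-- the max value only depends on the set of elements
theorem maxD_ext (l1 l2 : List Int) (h1 : l1 ≠ [])
    (h : ∀ x, x ∈ l1 ↔ x ∈ l2) :
    ((PySem.List.max? l1 (fun x => x)).getD 0) = ((PySem.List.max? l2 (fun x => x)).getD 0) := by
  have h2 : l2 ≠ [] := by
    obtain ⟨x, hx⟩ := List.exists_mem_of_ne_nil l1 h1
    exact List.ne_nil_of_mem ((h x).mp hx)
  obtain ⟨m1, hm1⟩ : ∃ m, PySem.List.max? l1 (fun x => x) = some m := by
    cases hc : PySem.List.max? l1 (fun x => x) with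
    | none => exact absurd ((PySem.List.max?_eq_none_iff _ _).mp hc) h1
    | some m => exact ⟨m, rfl⟩
  obtain ⟨m2, hm2⟩ : ∃ m, PySem.List.max? l2 (fun x => x) = some m := by
    cases hc : PySem.List.max? l2 (fun x => x) with
    | none => exact absurd ((PySem.List.max?_eq_none_iff _ _).mp hc) h2
    | some m => exact ⟨m, rfl⟩
  rw [hm1, hm2]
  simp only [Option.getD_some]
  have a1 := PySem.List.max?_isMax hm2 m1 ((h m1).mp (PySem.List.max?_mem hm1))
  have a2 := PySem.List.max?_isMax hm1 m2 ((h m2).mpr (PySem.List.max?_mem hm2))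
  exact le_antisymm a1 a2

-- A's while loop is the descending range map of slice sums
theorem pvWhileA_eq (cities : List Int) (c : Int) (j : Int) :
    pvWhileA cities c j
      = (PySem.List.pyRange j (-1) (-1)).map
          (fun j' => (PySem.List.slice cities (some j') (some (j' + c))).sum) := by
  by_cases h : 0 ≤ j
  · rw [pvWhileA, dif_pos h, PySem.List.pyRange_neg_one_cons (by omega), List.map_cons,
      pvWhileA_eq cities c (j - 1)]
  · rw [pvWhileA, dif_neg h, PySem.List.pyRange_neg_one_eq_nil (by omega), List.map_nil]
termination_by (j + 1).toNat
decreasing_by omega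

-- B's prefix list is the list of partial sums
theorem pvPrefix_eq (cities : List Int) :
    pvPrefix cities = (List.range (cities.length + 1)).map (fun j => (cities.take j).sum) := by
  induction cities using List.reverseRecOn with
  | nil => simp [pvPrefix]
  | append_singleton cs c ih =>
    unfold pvPrefix at *
    rw [List.foldl_append, ih, List.foldl_cons, List.foldl_nil]
    have hsplit : (List.range (cs.length + 1)).map (fun j => (cs.take j).sum)
        = (List.range cs.length).map (fun j => (cs.take j).sum) ++ [cs.sum] := by
      rw [List.range_succ, List.map_append]
      simp
    rw [hsplit, PySem.List.pyGetD_neg_one_append_singleton]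
    rw [List.length_append, List.length_singleton, List.range_succ, List.map_append]
    congr 1
    · rw [List.range_succ, List.map_append]
      congr 1
      · apply List.map_congr_left
        intro j hj
        rw [List.mem_range] at hj
        rw [List.take_append_of_le_length (by omega)]
      · simp
    · have ht : List.take (cs.length + 1) (cs ++ [c]) = cs ++ [c] :=
        List.take_of_length_le (by simp)
      simp [ht]

-- Source B's index normalisation in wsum equals Python's slice clamp
theorem pvClamp_eq (n : Nat) (a : Int) :
    min (max (if a < 0 then a + n else a) 0) (n : Int) = (PySem.List.clampIdx n a : Int) := by
  unfold PySem.List.clampIdx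
  split_ifs <;> omega

theorem getP (cities : List Int) (j : Nat) (hj : j ≤ cities.length) :
    PySem.List.pyGetD (pvPrefix cities) (j : Int) 0 = (cities.take j).sum := by
  rw [PySem.List.pyGetD_natCast, pvPrefix_eq]
  rw [List.getD_eq_getElem?_getD, List.getElem?_map, List.getElem?_range (by omega)]
  rfl

theorem sum_take_sub (cities : List Int) (a b : Nat) (hab : a ≤ b) :
    (cities.take b).sum - (cities.take a).sum = (((cities.drop a).take (b - a)).sum) := by
  have : cities.take b = cities.take a ++ (cities.drop a).take (b - a) := by
    rw [← List.take_add]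
    congr 1
    omega
  rw [this, List.sum_append]
  ring

-- wsum computes the slice sum exactly
theorem pvWsum_eq (cities : List Int) (a b : Int) :
    pvWsum (pvPrefix cities) (cities.length : Int) a b
      = (PySem.List.slice cities (some a) (some b)).sum := by
  simp only [pvWsum, PySem.List.slice]
  rw [pvClamp_eq, pvClamp_eq]
  have ha := PySem.List.clampIdx_le cities.length a
  have hb := PySem.List.clampIdx_le cities.length b
  by_cases hlt : PySem.List.clampIdx cities.length a < PySem.List.clampIdx cities.length b
  · rw [if_pos (by exact_mod_cast hlt)]
    rw [getP cities _ hb, getP cities _ ha]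
    exact sum_take_sub cities _ _ (le_of_lt hlt)
  · rw [if_neg (by exact_mod_cast hlt)]
    have h0 : PySem.List.clampIdx cities.length b - PySem.List.clampIdx cities.length a = 0 := by
      omega
    rw [h0]
    simp

-- per city value: A's descending while-loop max equals B's ascending prefix-window max
theorem perCity_eq (cities : List Int) (c : Int) (hc : c ≤ (cities.length : Int)) :
    (PySem.List.max? (pvWhileA cities c ((cities.length : Int) - c)) (fun x => x)).getD 0
      = (PySem.List.max? ((PySem.List.pyRange 0 ((cities.length : Int) - c + 1) 1).map
          (fun j => pvWsum (pvPrefix cities) (cities.length : Int) j (j + c))) (fun x => x)).getD 0 := by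
  rw [pvWhileA_eq]
  apply maxD_ext
  · rw [PySem.List.pyRange_neg_one_cons (by omega)]
    simp
  · intro x
    simp only [List.mem_map, PySem.List.mem_pyRange_neg_one, PySem.List.mem_pyRange_one,
      pvWsum_eq]
    constructor
    · rintro ⟨j, ⟨hj1, hj2⟩, rfl⟩
      exact ⟨j, ⟨by omega, by omega⟩, rfl⟩
    · rintro ⟨j, ⟨hj1, hj2⟩, rfl⟩
      exact ⟨j, ⟨by omega, by omega⟩, rfl⟩

-- the range-over-indices map in A is a direct map over the list
theorem mapA_eq (cities : List Int) (F : Int → Int) :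
    (PySem.List.pyRange 0 (cities.length : Int) 1).map (fun i => F (PySem.List.pyGetD cities i 0))
      = cities.map F := by
  rw [show (fun i => F (PySem.List.pyGetD cities i 0))
        = F ∘ (fun i => PySem.List.pyGetD cities i 0) from rfl,
    ← List.map_map, PySem.List.map_pyGetD_pyRange_zero']

-- the memoised loop returns the same list as a direct map
theorem pvLoopB_eq (P : List Int) (n : Int) (cs : List Int) (best : PySem.Dict Int Int)
    (maxEle : List Int)
    (hb : ∀ c, best.contains c = true →
      best.getD c 0 = (PySem.List.max? ((PySem.List.pyRange 0 (n - c + 1) 1).map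
        (fun j => pvWsum P n j (j + c))) (fun x => x)).getD 0) :
    pvLoopB P n cs best maxEle
      = maxEle ++ cs.map (fun c =>
          (PySem.List.max? ((PySem.List.pyRange 0 (n - c + 1) 1).map
            (fun j => pvWsum P n j (j + c))) (fun x => x)).getD 0) := by
  induction cs generalizing best maxEle with
  | nil => simp [pvLoopB]
  | cons c rest ih =>
    rw [pvLoopB]
    by_cases hc : best.contains c = true
    · rw [if_pos hc, ih best _ hb, hb c hc]
      simp
    · rw [if_neg hc]
      have hb' : ∀ c', (best.insert c ((PySem.List.max? ((PySem.List.pyRange 0 (n - c + 1) 1).map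
          (fun j => pvWsum P n j (j + c))) (fun x => x)).getD 0)).contains c' = true →
          (best.insert c ((PySem.List.max? ((PySem.List.pyRange 0 (n - c + 1) 1).map
            (fun j => pvWsum P n j (j + c))) (fun x => x)).getD 0)).getD c' 0
            = (PySem.List.max? ((PySem.List.pyRange 0 (n - c' + 1) 1).map
              (fun j => pvWsum P n j (j + c'))) (fun x => x)).getD 0 := by
        intro c' hc'
        rw [PySem.Dict.getD_insert]
        by_cases he : c' = c
        · rw [if_pos he, he]
        · rw [if_neg he]
          rw [PySem.Dict.contains_insert] at hc'
          simp only [Bool.or_eq_true, beq_iff_eq] at hc'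
          exact hb c' (hc'.resolve_left he)
      rw [ih _ _ hb', PySem.Dict.getD_insert, if_pos rfl]
      simp

-- ===== VERDICT (by name: the statement is the Claim_ definition above) =====
theorem fnumber_spec : Claim_equal_fnumber := by
  intro k cities _hdom hpre
  unfold Spec_fnumber
  simp only [fnumber, fnumber_alt]
  by_cases hs : cities.sum ≤ k
  · rw [if_pos hs, if_pos hs]
  · rw [if_neg hs, if_neg hs]
    have hc : ∀ c ∈ cities, c ≤ (cities.length : Int) := by
      rcases hpre with h | ⟨h, _⟩
      · exact absurd h hs
      · exact h
    have hloop : pvLoopB (pvPrefix cities) (cities.length : Int) cities PySem.Dict.empty []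
        = cities.map (fun c =>
          (PySem.List.max? ((PySem.List.pyRange 0 ((cities.length : Int) - c + 1) 1).map
            (fun j => pvWsum (pvPrefix cities) (cities.length : Int) j (j + c)))
            (fun x => x)).getD 0) := by
      rw [pvLoopB_eq _ _ _ _ _ (by intro c hcon; rw [PySem.Dict.contains_empty] at hcon; cases hcon),
        List.nil_append]
    have hmax :
        (PySem.List.pyRange 0 (cities.length : Int) 1).map (fun i =>
          (PySem.List.max? (pvWhileA cities (PySem.List.pyGetD cities i 0)
            ((cities.length : Int) - PySem.List.pyGetD cities i 0)) (fun x => x)).getD 0)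
        = pvLoopB (pvPrefix cities) (cities.length : Int) cities PySem.Dict.empty [] := by
      rw [hloop, mapA_eq cities (fun c =>
        (PySem.List.max? (pvWhileA cities c ((cities.length : Int) - c)) (fun x => x)).getD 0)]
      exact List.map_congr_left (fun c hcm => perCity_eq cities c (hc c hcm))
    rw [hmax]
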